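-- pv_equiv track=rewrite | github.com/tjega/glycancomp | SimulationModule/run_ode_sim.py | exclude_params
-- ===== SOURCE A (Python) =====
-- def exclude_params(params_init_dict, exclude_params_list):
--     sim_dict = dict(params_init_dict)
--     # Get position of removed keys
--     params_key_pos = []
--     for index, (key, value) in enumerate(params_init_dict.items()):
--         if key in exclude_params_list:
--             params_key_pos.append(index)
--     # Remove excluded parameters in sims_params_dict
--     for k in exclude_params_list:
--         sim_dict.pop(k, None)
--     return params_key_pos, sim_dict
-- ===== SOURCE B (Python) =====
-- def exclude_params(params_init_dict, exclude_params_list):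
--     # Set-intersection strategy: build a key->position table once, intersect the
--     # key sets, sort the hit positions; keep the rest with a dict comprehension.
--     # (sorted() absorbs the arbitrary set iteration order, since positions are distinct.)
--     excl = set(exclude_params_list)
--     pos_of = {k: i for i, k in enumerate(params_init_dict)}
--     params_key_pos = sorted(pos_of[k] for k in excl & pos_of.keys())
--     sim_dict = {k: v for k, v in params_init_dict.items() if k not in excl}
--     return params_key_pos, sim_dict
-- ===== Notes on version B (the rewrite author's own statement) =====
-- stated objective: faster
-- what changed: A scans the dict items testing each key against exclude_params_list and then pops the excluded keys from a copy in a second loop; B instead builds a key-to-position table once, intersects the exclude set with the key set and sorts the resulting positions, and keeps the remaining pairs with a dict comprehension over a set, so the per-element list membership scans disappear.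
import Mathlib
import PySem

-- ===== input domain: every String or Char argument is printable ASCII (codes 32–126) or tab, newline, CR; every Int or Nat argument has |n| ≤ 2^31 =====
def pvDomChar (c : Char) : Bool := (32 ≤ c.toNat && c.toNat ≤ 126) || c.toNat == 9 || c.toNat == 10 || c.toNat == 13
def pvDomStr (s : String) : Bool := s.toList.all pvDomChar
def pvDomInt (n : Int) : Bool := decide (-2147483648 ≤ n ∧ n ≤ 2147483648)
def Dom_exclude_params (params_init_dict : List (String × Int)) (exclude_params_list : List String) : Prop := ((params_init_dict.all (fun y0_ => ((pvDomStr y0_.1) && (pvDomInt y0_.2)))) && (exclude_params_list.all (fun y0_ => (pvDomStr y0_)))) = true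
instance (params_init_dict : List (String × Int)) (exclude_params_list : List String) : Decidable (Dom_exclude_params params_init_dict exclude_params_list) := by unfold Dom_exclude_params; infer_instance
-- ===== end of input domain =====

-- B replaces A's scan-and-pop shape by a set-intersection strategy: a key→position
-- table built once, the exclude set intersected with the key set and the hit positions
-- sorted, the kept pairs rebuilt by a comprehension; return value only, no mutation.

-- ===== PORT A =====
def exclude_params (params_init_dict : List (String × Int)) (exclude_params_list : List String) : List Int × (List (String × Int)) :=
  let d : PySem.Dict String Int := PySem.Dict.ofList params_init_dict
  let sim_dict := d
  let params_key_pos : List Int :=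
    (PySem.List.enumerate d.items 0).foldl
      (fun acc iv => if exclude_params_list.contains iv.2.1 then acc ++ [iv.1] else acc) []
  let sim_dict := exclude_params_list.foldl (fun s k => PySem.Dict.erase s k) sim_dict
  (params_key_pos, sim_dict.items)

-- ===== PORT B =====
def exclude_params_alt (params_init_dict : List (String × Int)) (exclude_params_list : List String) : List Int × (List (String × Int)) :=
  let excl : PySem.Set String := PySem.Set.ofList exclude_params_list
  let d : PySem.Dict String Int := PySem.Dict.ofList params_init_dict
  let pos_of : PySem.Dict String Int :=
    (PySem.List.enumerate d.keys 0).foldl (fun m ik => m.insert ik.2 ik.1) PySem.Dict.empty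
  -- sorted(pos_of[k] for k in excl & pos_of.keys()): every k here is a key of pos_of,
  -- so the total getD (default never used) renders the lookup pos_of[k] exactly
  let params_key_pos : List Int :=
    PySem.List.sorted ((PySem.Set.inter excl pos_of.keys).map (fun k => pos_of.getD k 0)) (fun x => x) false
  let sim_dict : PySem.Dict String Int :=
    d.items.foldl (fun m kv => if excl.contains kv.1 then m else m.insert kv.1 kv.2) PySem.Dict.empty
  (params_key_pos, sim_dict.items)

-- ===== PRECONDITION & SPEC =====
def Spec_exclude_params (params_init_dict : List (String × Int)) (exclude_params_list : List String) (out : List Int × (List (String × Int))) : Prop := out = exclude_params_alt params_init_dict exclude_params_list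
instance (params_init_dict : List (String × Int)) (exclude_params_list : List String) (out : List Int × (List (String × Int))) : Decidable (Spec_exclude_params params_init_dict exclude_params_list out) := by unfold Spec_exclude_params; infer_instance

-- ===== CLAIM (what is proved, stated in full; the proofs are below) =====
def Claim_equal_exclude_params : Prop := ∀ (params_init_dict : List (String × Int)) (exclude_params_list : List String), Dom_exclude_params params_init_dict exclude_params_list → Spec_exclude_params params_init_dict exclude_params_list (exclude_params params_init_dict exclude_params_list)

-- ===== LEMMAS AND PROOFS =====

-- A's pop loop over the exclude list is a filter of the items list.
theorem erase_foldl_eq_filter (ex : List String) :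
    ∀ (items : List (String × Int)),
    (ex.foldl (fun s k => PySem.Dict.erase s k) (PySem.Dict.mk items)).items
      = items.filter (fun p => !ex.contains p.1) := by
  induction ex with
  | nil => intro items; simp
  | cons k t ih =>
    intro items
    rw [List.foldl_cons,
      show PySem.Dict.erase (PySem.Dict.mk items) k
          = PySem.Dict.mk (items.filter (fun p => !(p.1 == k))) from rfl,
      ih, List.filter_filter]
    apply List.filter_congr
    intro p _
    have hsym : (p.1 == k) = (k == p.1) := by
      by_cases h : p.1 = k
      · simp [h]
      · simp [h]
        exact fun h2 => h (Eq.symm h2)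
    simp only [List.contains_cons, hsym, Bool.not_or]
    exact Bool.and_comm _ _

-- B's position-table items: inserting (key ↦ index) over enumerate(ks) appends pairwise.
theorem posmap_items (ks : List String) (hnd : ks.Nodup) :
    ((PySem.List.enumerate ks 0).foldl (fun m ik => m.insert ik.2 ik.1) PySem.Dict.empty).items
      = (PySem.List.enumerate ks 0).map (fun ik => (ik.2, ik.1)) := by
  have h := PySem.Dict.items_foldl_insert_fresh (l := PySem.List.enumerate ks 0)
    (k := fun ik => ik.2) (v := fun ik => ik.1) (d := PySem.Dict.empty)
    (fun _ _ => rfl) (by rw [PySem.List.map_snd_enumerate]; exact hnd)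
  simpa using h

-- B's lookup pos_of[k] is the index of k in ks.
theorem posmap_getD (ks : List String) (hnd : ks.Nodup) (k : String) (hk : k ∈ ks) :
    ((PySem.List.enumerate ks 0).foldl (fun m ik => m.insert ik.2 ik.1) PySem.Dict.empty).getD k 0
      = (ks.idxOf k : Int) := by
  have hlt : ks.idxOf k < ks.length := List.idxOf_lt_length_of_mem hk
  have hmem : (k, (ks.idxOf k : Int)) ∈
      ((PySem.List.enumerate ks 0).foldl (fun m ik => m.insert ik.2 ik.1) PySem.Dict.empty).items := by
    rw [posmap_items ks hnd]
    refine List.mem_map.mpr ⟨((ks.idxOf k : Int), k), ?_, rfl⟩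
    rw [PySem.List.mem_enumerate_iff]
    exact ⟨ks.idxOf k, hlt, by simp [List.getElem_idxOf hlt]⟩
  have hkeys : ((PySem.List.enumerate ks 0).foldl (fun m ik => m.insert ik.2 ik.1) PySem.Dict.empty).keys.Nodup := by
    have := PySem.Dict.nodup_keys_foldl_insert_key (l := PySem.List.enumerate ks 0)
      (key := fun ik => ik.2) (f := fun _ ik => ik.1) (d := PySem.Dict.empty)
      (PySem.Dict.nodup_keys_empty)
    exact this
  exact PySem.Dict.getD_of_mem_items _ hmem hkeys 0

-- The position table's key list is the dict's key list.
theorem posmap_keys (ks : List String) (hnd : ks.Nodup) :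
    ((PySem.List.enumerate ks 0).foldl (fun m ik => m.insert ik.2 ik.1) PySem.Dict.empty).keys = ks := by
  have h := PySem.Dict.keys_foldl_insert_key (l := PySem.List.enumerate ks 0)
    (key := fun ik => ik.2) (f := fun _ ik => ik.1) (d := PySem.Dict.empty)
  rw [h, PySem.List.map_snd_enumerate, PySem.Dict.keys_empty, PySem.Set.update_nil_left,
    PySem.Set.ofList_eq_self_of_nodup ks hnd]

-- Set.ofList membership test agrees with list membership test.
theorem ofList_contains (ex : List String) (x : String) :
    (PySem.Set.ofList ex).contains x = ex.contains x := by
  by_cases hx : x ∈ ex <;>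
    simp [PySem.Set.contains_eq_listContains, PySem.Set.mem_ofList, hx]

-- B's dict comprehension is a filter of the items list.
theorem comp_items (ex : List String) (items : List (String × Int)) (hnd : (items.map (fun q => q.1)).Nodup) :
    (items.foldl (fun m kv => if (PySem.Set.ofList ex).contains kv.1 then m else m.insert kv.1 kv.2) PySem.Dict.empty).items
      = items.filter (fun q => !ex.contains q.1) := by
  have hstep : items.foldl (fun m kv => if (PySem.Set.ofList ex).contains kv.1 then m else m.insert kv.1 kv.2) PySem.Dict.empty
      = items.foldl (fun m kv => if (!ex.contains kv.1) then m.insert kv.1 kv.2 else m) PySem.Dict.empty := by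
    apply PySem.List.foldl_congr_mem
    intro m kv _
    rw [ofList_contains]
    cases ex.contains kv.1 <;> simp
  rw [hstep, PySem.List.foldl_if_eq_foldl_filter]
  have hsub : (items.filter (fun kv => !ex.contains kv.1)).Sublist items := List.filter_sublist
  have hnd' : ((items.filter (fun kv => !ex.contains kv.1)).map (fun q => q.1)).Nodup :=
    List.Sublist.nodup (hsub.map (fun q => q.1)) hnd
  have h := PySem.Dict.items_foldl_insert_fresh (l := items.filter (fun kv => !ex.contains kv.1))
    (k := fun kv => kv.1) (v := fun kv => kv.2) (d := PySem.Dict.empty)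
    (fun _ _ => rfl) hnd'
  simpa using h

-- The sorted intersection positions are exactly A's increasing filtered indices.
theorem pos_sorted_eq (ex : List String) (items : List (String × Int))
    (hnd : (items.map (fun q => q.1)).Nodup) :
    PySem.List.sorted
      ((PySem.Set.inter (PySem.Set.ofList ex) (items.map (fun q => q.1))).map
        (fun k => (((items.map (fun q => q.1)).idxOf k : Nat) : Int)))
      (fun x => x) false
      = ((PySem.List.enumerate items 0).filter (fun iv => ex.contains iv.2.1)).map (fun iv => iv.1) := by
  set ks := items.map (fun q => q.1) with hks
  set rhs := ((PySem.List.enumerate items 0).filter (fun iv => ex.contains iv.2.1)).map (fun iv => iv.1) with hrhs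
  have hpw : rhs.Pairwise (fun a b => a < b) := by
    rw [hrhs, List.pairwise_map]
    exact List.Pairwise.filter _ (PySem.List.pairwise_lt_enumerate items 0)
  have hndr : rhs.Nodup := hpw.imp (fun h => ne_of_lt h)
  have hndl : ((PySem.Set.inter (PySem.Set.ofList ex) ks).map (fun k => ((ks.idxOf k : Nat) : Int))).Nodup := by
    apply List.Nodup.map_on
    · intro k1 h1 k2 h2 heq
      have hk1 : k1 ∈ ks := ((PySem.Set.mem_inter _ _ _).mp h1).2
      have hk2 : k2 ∈ ks := ((PySem.Set.mem_inter _ _ _).mp h2).2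
      have hidx : List.idxOf k1 ks = List.idxOf k2 ks := Nat.cast_injective heq
      have e1 := List.getElem_idxOf (List.idxOf_lt_length_of_mem hk1)
      have e2 := List.getElem_idxOf (List.idxOf_lt_length_of_mem hk2)
      simp only [hidx] at e1
      exact e1.symm.trans e2
    · exact PySem.Set.nodup_inter _ _ (PySem.Set.nodup_ofList ex)
  have hmem : ∀ a, a ∈ ((PySem.Set.inter (PySem.Set.ofList ex) ks).map (fun k => ((ks.idxOf k : Nat) : Int))) ↔ a ∈ rhs := by
    intro a
    simp only [List.mem_map, PySem.Set.mem_inter, PySem.Set.mem_ofList, hrhs, List.mem_filter,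
      PySem.List.mem_enumerate_iff]
    constructor
    · rintro ⟨k, ⟨hkex, hkks⟩, rfl⟩
      have hlt : ks.idxOf k < ks.length := List.idxOf_lt_length_of_mem hkks
      have hlen : ks.length = items.length := by rw [hks]; exact List.length_map ..
      refine ⟨(((ks.idxOf k : Nat) : Int), items[ks.idxOf k]'(hlen ▸ hlt)), ⟨⟨ks.idxOf k, hlen ▸ hlt, by simp⟩, ?_⟩, by simp⟩
      have hfst : (items[ks.idxOf k]'(hlen ▸ hlt)).1 = k := by
        have h1 := List.getElem_idxOf hlt
        simp only [hks, List.getElem_map] at h1 ⊢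
        exact h1
      simpa [hfst] using hkex
    · rintro ⟨iv, ⟨⟨i, hi, rfl⟩, hc⟩, rfl⟩
      refine ⟨items[i].1, ⟨by simpa using hc, ?_⟩, ?_⟩
      · show items[i].1 ∈ ks
        rw [hks]; exact List.mem_map_of_mem (List.getElem_mem hi)
      · have hig : i < ks.length := by simpa [hks] using hi
        have hgm : ks[i]'hig = items[i].1 := by simp [hks]
        have hidx : List.idxOf items[i].1 ks = i := by
          rw [← hgm]
          exact List.Nodup.idxOf_getElem hnd i hig
        simp [hidx]
  exact PySem.List.sorted_eq_of_perm_of_pairwise_lt _ _ _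
    ((List.perm_ext_iff_of_nodup hndr hndl).mpr (fun a => (hmem a).symm)) hpw

-- ===== VERDICT (by name: the statement is the Claim_ definition above) =====
theorem exclude_params_spec : Claim_equal_exclude_params := by
  intro p ex _
  show exclude_params p ex = exclude_params_alt p ex
  unfold exclude_params exclude_params_alt
  dsimp only
  have hnd : ((PySem.Dict.ofList p (ν := Int)).items.map (fun q => q.1)).Nodup :=
    PySem.Dict.nodup_keys_ofList p
  have hknd : (PySem.Dict.ofList p (ν := Int)).keys.Nodup := hnd
  refine Prod.ext ?_ ?_
  · -- position lists agree
    show (PySem.List.enumerate (PySem.Dict.ofList p (ν := Int)).items 0).foldl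
        (fun acc iv => if ex.contains iv.2.1 then acc ++ [iv.1] else acc) []
      = _
    rw [PySem.List.foldl_append_if, List.nil_append]
    rw [posmap_keys (PySem.Dict.ofList p (ν := Int)).keys hknd]
    rw [List.map_congr_left (fun k hk =>
      posmap_getD (PySem.Dict.ofList p (ν := Int)).keys hknd k
        ((PySem.Set.mem_inter _ _ _).mp hk).2)]
    exact (pos_sorted_eq ex (PySem.Dict.ofList p (ν := Int)).items hnd).symm
  · -- kept dicts agree
    show (ex.foldl (fun s k => PySem.Dict.erase s k) (PySem.Dict.mk (PySem.Dict.ofList p (ν := Int)).items)).items = _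
    rw [erase_foldl_eq_filter ex (PySem.Dict.ofList p (ν := Int)).items,
      comp_items ex (PySem.Dict.ofList p (ν := Int)).items hnd]
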